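-- pv_equiv track=rewrite | github.com/Amirhossein-Nourbakhsh/GIS_Prod | US_Topo_Word/code/USTopoSearch_Word_prod.py | countSheets
-- ===== SOURCE A (Python) =====
-- def countSheets(mapslist):
--     if len(mapslist) == 0:
--         count = []
--     elif len(mapslist) == 1:
--         count = [1]
--     else:
--         count = [1]
--         i = 1
--         while i < len(mapslist):
--             if mapslist[i][3] == mapslist[i-1][3]:
--                 count.append(count[i-1]+1)
--             else:
--                 count.append(1)
--             i = i + 1
--     return count
-- ===== SOURCE B (Python) =====
-- def countSheets(mapslist):
--     if len(mapslist) == 0: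
--         return []
--     if len(mapslist) == 1:
--         return [1]
--     # collect consecutive run lengths of equal 4th-field values, then expand each run
--     runs = []
--     key, n = mapslist[0][3], 1
--     for m in mapslist[1:]:
--         if m[3] == key:
--             n += 1
--         else:
--             runs.append(n)
--             key, n = m[3], 1
--     runs.append(n)
--     return [j for n in runs for j in range(1, n + 1)]
-- ===== Notes on version B (the rewrite author's own statement) =====
-- stated objective: alternative
-- what changed: Replaces A's index-based running tally that reads back count[i-1] with a two-phase decomposition: one pass collecting consecutive run lengths of equal 4th-field values, then expanding each run of length n into 1..n.
import Mathlib
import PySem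

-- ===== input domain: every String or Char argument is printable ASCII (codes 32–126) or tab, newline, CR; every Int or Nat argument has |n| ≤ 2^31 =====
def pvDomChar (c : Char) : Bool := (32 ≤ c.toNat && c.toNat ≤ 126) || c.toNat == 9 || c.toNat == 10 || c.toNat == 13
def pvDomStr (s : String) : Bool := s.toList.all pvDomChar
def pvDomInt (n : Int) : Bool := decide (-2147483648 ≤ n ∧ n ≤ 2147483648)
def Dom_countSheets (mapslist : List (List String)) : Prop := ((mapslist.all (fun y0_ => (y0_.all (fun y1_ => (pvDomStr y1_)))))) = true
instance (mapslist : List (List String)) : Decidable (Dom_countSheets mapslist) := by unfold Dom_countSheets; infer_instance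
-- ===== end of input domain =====

-- B replaces A's index-based running tally with a run-length-collect-then-expand decomposition; alternative, same cost.

-- ===== PORT A =====
-- mapslist[i][3] (valid under Pre_, where both index accesses succeed)
def pvKeyAt (ml : List (List String)) (i : Nat) : String :=
  (PySem.List.pyGet? ((PySem.List.pyGet? ml (i : Int)).getD []) 3).getD ""

-- the 'while i < len(mapslist)' loop of A, state (count, i)
def pvLoopA (ml : List (List String)) (count : List Int) (i : Nat) : List Int :=
  if _h : i < ml.length then
    pvLoopA ml
      (count ++ [if pvKeyAt ml i = pvKeyAt ml (i-1)
                 then (PySem.List.pyGet? count ((i : Int) - 1)).getD 0 + 1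
                 else 1])
      (i + 1)
  else count
termination_by ml.length - i

def countSheets (mapslist : List (List String)) : List Int :=
  if mapslist.length = 0 then []
  else if mapslist.length = 1 then [1]
  else pvLoopA mapslist [1] 1

-- ===== PORT B =====
-- m[3] (valid under Pre_)
def pvKeyB (m : List String) : String := (PySem.List.pyGet? m 3).getD ""

-- run lengths of consecutive equal keys (current run key k already counted n times)
def pvRunLens (k : String) (n : Nat) : List (List String) → List Nat
  | [] => [n]
  | m :: t => if pvKeyB m = k then pvRunLens k (n + 1) t else n :: pvRunLens (pvKeyB m) 1 t

def countSheets_alt (mapslist : List (List String)) : List Int :=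
  match mapslist with
  | [] => []
  | [_] => [1]
  | m :: rest =>
      (pvRunLens (pvKeyB m) 1 rest).flatMap
        (fun n => (List.range n).map (fun j => ((j : Int) + 1)))

-- ===== PRECONDITION & SPEC =====
-- Pre_ excludes exactly the inputs where Python A raises IndexError: with 2+ rows, A reads
-- row[3] of every row, so every row must have at least 4 fields (B raises there too).
def Pre_countSheets (mapslist : List (List String)) : Prop :=
  mapslist.length ≤ 1 ∨ ∀ m ∈ mapslist, 4 ≤ m.length
instance (mapslist : List (List String)) : Decidable (Pre_countSheets mapslist) := by
  unfold Pre_countSheets; infer_instance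

def pvWitness_countSheets : List (List String) :=
  [["a", "b", "c", "d"], ["a", "b", "c", "d"], ["p", "q", "r", "s"]]

def Spec_countSheets (mapslist : List (List String)) (out : List Int) : Prop := out = countSheets_alt mapslist
instance (mapslist : List (List String)) (out : List Int) : Decidable (Spec_countSheets mapslist out) := by unfold Spec_countSheets; infer_instance

-- ===== CLAIM (what is proved, stated in full; the proofs are below) =====
def Claim_equal_countSheets : Prop := ∀ (mapslist : List (List String)), Dom_countSheets mapslist → Pre_countSheets mapslist → Spec_countSheets mapslist (countSheets mapslist)

-- ===== LEMMAS AND PROOFS =====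

-- canonical middle form: remaining suffix expanded with current key k and current count c
def pvExpand (k : String) (c : Int) : List (List String) → List Int
  | [] => []
  | m :: t => if pvKeyB m = k then (c + 1) :: pvExpand k (c + 1) t
              else (1 : Int) :: pvExpand (pvKeyB m) 1 t

def pvRng (n : Nat) : List Int := (List.range n).map (fun j => ((j : Int) + 1))

-- B side: flat-mapped run lengths = already-emitted prefix 1..c plus the expansion
lemma flatMap_runLens (t : List (List String)) : ∀ (k : String) (c : Nat),
    (pvRunLens k c t).flatMap (fun n => (List.range n).map (fun j => ((j : Int) + 1)))
      = pvRng c ++ pvExpand k (c : Int) t := by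
  induction t with
  | nil => intro k c; simp [pvRunLens, pvExpand, pvRng]
  | cons m t ih =>
      intro k c
      by_cases h : pvKeyB m = k
      · have hr : pvRng (c + 1) = pvRng c ++ [(c : Int) + 1] := by
          simp [pvRng, List.range_succ]
        rw [show pvRunLens k c (m :: t) = pvRunLens k (c + 1) t by simp [pvRunLens, h],
            ih k (c + 1), hr]
        push_cast
        simp [pvExpand, h]
      · rw [show pvRunLens k c (m :: t) = c :: pvRunLens (pvKeyB m) 1 t by simp [pvRunLens, h],
            List.flatMap_cons, ih (pvKeyB m) 1]
        simp [pvExpand, h, pvRng]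

lemma pyGet?_last (count : List Int) (x : Int) :
    PySem.List.pyGet? (count ++ [x]) ((count.length : Int)) = some x := by
  simp [PySem.List.pyGet?, PySem.List.pyIdx?]

-- A side: the while loop appends exactly the expansion of the remaining suffix
lemma loopA_expand : ∀ (n : Nat) (ml : List (List String)) (count : List Int) (i : Nat),
    ml.length - i = n → count.length = i → 1 ≤ i →
    pvLoopA ml count i
      = count ++ pvExpand (pvKeyAt ml (i - 1))
          ((PySem.List.pyGet? count ((i : Int) - 1)).getD 0) (ml.drop i) := by
  intro n
  induction n with
  | zero =>
      intro ml count i hn hc hi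
      have hge : ml.length ≤ i := by omega
      rw [pvLoopA]
      simp [Nat.not_lt.mpr hge, List.drop_eq_nil_of_le hge, pvExpand]
  | succ n ih =>
      intro ml count i hn hc hi
      have hlt : i < ml.length := by omega
      have hdrop : ml.drop i = ml[i] :: ml.drop (i + 1) :=
        List.drop_eq_getElem_cons hlt
      have hkey : pvKeyAt ml i = pvKeyB ml[i] := by
        simp [pvKeyAt, pvKeyB, PySem.List.pyGet?, PySem.List.pyIdx?, hlt]
      rw [pvLoopA]
      simp only [hlt, dif_pos]
      set c : Int := (PySem.List.pyGet? count ((i : Int) - 1)).getD 0 with hcdef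
      set v : Int := if pvKeyAt ml i = pvKeyAt ml (i-1) then c + 1 else 1 with hvdef
      have hc' : (count ++ [v]).length = i + 1 := by simp [hc]
      have hget : (PySem.List.pyGet? (count ++ [v]) ((((i + 1 : Nat)) : Int) - 1)).getD 0 = v := by
        have h2 : (((i + 1 : Nat)) : Int) - 1 = (count.length : Int) := by omega
        rw [h2, pyGet?_last]; rfl
      rw [ih ml (count ++ [v]) (i + 1) (by omega) hc' (by omega)]
      have hi1 : (i + 1) - 1 = i := by omega
      rw [hi1, hget, hdrop]
      by_cases h : pvKeyB ml[i] = pvKeyAt ml (i - 1)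
      · have hk2 : pvKeyAt ml i = pvKeyAt ml (i - 1) := hkey.trans h
        have hv : v = c + 1 := by simp [hvdef, hk2]
        simp [pvExpand, h, hv, hk2, List.append_assoc]
      · have hv : v = 1 := by rw [hvdef, if_neg]; rw [hkey]; exact h
        simp [pvExpand, h, hv, hkey, List.append_assoc]

-- ===== VERDICT (by name: the statement is the Claim_ definition above) =====
theorem countSheets_spec : Claim_equal_countSheets := by
  intro ml _dom _pre
  unfold Spec_countSheets
  match ml with
  | [] => rfl
  | [m] => rfl
  | m :: m' :: rest =>
      have hlen : (m :: m' :: rest).length ≠ 0 := by simp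
      have hlen1 : (m :: m' :: rest).length ≠ 1 := by simp
      unfold countSheets
      rw [if_neg hlen, if_neg hlen1]
      rw [loopA_expand ((m :: m' :: rest).length - 1) (m :: m' :: rest) [1] 1 rfl rfl le_rfl]
      have hnn : (0 : Int) ≤ (rest.length : Int) + 1 := by positivity
      have hkey0 : pvKeyAt (m :: m' :: rest) 0 = pvKeyB m := by
        simp [pvKeyAt, pvKeyB, PySem.List.pyGet?, PySem.List.pyIdx?, hnn]
      have hget : (PySem.List.pyGet? ([1] : List Int) ((((1 : Nat)) : Int) - 1)).getD 0 = 1 := by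
        simp [PySem.List.pyGet?, PySem.List.pyIdx?]
      rw [show (1 : Nat) - 1 = 0 from rfl, hkey0, hget]
      show [1] ++ pvExpand (pvKeyB m) 1 (m' :: rest)
        = (pvRunLens (pvKeyB m) 1 (m' :: rest)).flatMap
            (fun n => (List.range n).map (fun j => ((j : Int) + 1)))
      rw [flatMap_runLens (m' :: rest) (pvKeyB m) 1]
      simp [pvRng]
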